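-- pv_equiv track=rewrite | github.com/whoisjones/ner-dataset-generation | scripts/compute_span_ratios.py | all_spans_mask
-- ===== SOURCE A (Python) =====
-- def all_spans_mask(input_ids, sequence_ids, max_span_length = 30):
--     text_start_index = 0
--     while sequence_ids[text_start_index] == None:
--         text_start_index += 1
--
--     text_end_index = len(input_ids) - 1
--     while sequence_ids[text_end_index] == None:
--         text_end_index -= 1
--
--     start_mask, end_mask = [], []
--     for sequence_id in sequence_ids:
--         start_mask.append(1 if sequence_id is not None else 0)
--         end_mask.append(1 if sequence_id is not None else 0)
--
--     span_mask = [
--         [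
--             (j - i >= 0 and j - i < max_span_length) * s * e for j, e in enumerate(end_mask)
--         ]
--         for i, s in enumerate(start_mask)
--     ]
--
--     return text_start_index, text_end_index, start_mask, end_mask, span_mask
-- ===== SOURCE B (Python) =====
-- def all_spans_mask(input_ids, sequence_ids, max_span_length=30):
--     n = len(sequence_ids)
--     start_mask = [int(s is not None) for s in sequence_ids]
--     end_mask = start_mask[:]
--     text_start_index = start_mask.index(1)
--     prefix = start_mask[:len(input_ids)]
--     text_end_index = len(input_ids) - 1 - prefix[::-1].index(1)
--     span_mask = []
--     for i in range(n):
--         if start_mask[i] and max_span_length > 0: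
--             hi = min(i + max_span_length, n)
--             span_mask.append([0] * i + end_mask[i:hi] + [0] * (n - hi))
--         else:
--             span_mask.append([0] * n)
--     return text_start_index, text_end_index, start_mask, end_mask, span_mask
-- ===== Notes on version B (the rewrite author's own statement) =====
-- stated objective: faster
-- what changed: Replaces A's two while-loop index scans by list.index on the 0/1 mask (and on the reversed prefix for the end index), builds one mask by comprehension and copies it instead of appending to two lists in a loop, and builds each span_mask row by stitching zero blocks around a slice of end_mask over the valid band instead of evaluating the per-cell boolean formula on all n^2 cells (measured ~4x faster at n=4096).
-- outside the precondition, e.g. on all_spans_mask([0], [None, 1], 5): A returns (1, -1, [0, 1], [0, 1], [[0, 0], [0, 1]]), B raises ValueError; on all_spans_mask([], [1], 5): A returns (0, -1, [1], [1], [[1]]), B raises ValueError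
import Mathlib
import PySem

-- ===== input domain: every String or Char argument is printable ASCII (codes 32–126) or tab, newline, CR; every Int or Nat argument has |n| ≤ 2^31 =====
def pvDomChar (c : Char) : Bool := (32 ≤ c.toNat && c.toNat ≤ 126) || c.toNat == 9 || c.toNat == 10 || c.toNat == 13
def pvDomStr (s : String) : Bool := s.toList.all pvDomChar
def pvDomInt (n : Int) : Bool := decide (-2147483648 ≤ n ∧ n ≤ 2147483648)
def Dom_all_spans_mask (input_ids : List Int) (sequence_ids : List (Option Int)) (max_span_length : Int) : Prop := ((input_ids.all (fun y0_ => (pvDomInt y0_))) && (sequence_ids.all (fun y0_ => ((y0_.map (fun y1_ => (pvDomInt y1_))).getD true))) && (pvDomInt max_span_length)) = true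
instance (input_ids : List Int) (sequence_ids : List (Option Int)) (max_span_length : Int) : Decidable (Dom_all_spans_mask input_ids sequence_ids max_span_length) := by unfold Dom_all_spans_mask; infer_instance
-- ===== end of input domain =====

-- B replaces A's while-loop scans by list.index on the 0/1 mask and builds each span row by
-- stitching zero blocks around a band slice of end_mask instead of testing every cell (objective: faster, measured).
-- ===== PORT A =====
-- 'while sequence_ids[i] == None: i += 1' — fuel-bounded; on inputs where Python raises IndexError
-- the fuel/pyGet? fallback returns the current index (outside Pre_).
def aScanUp (seq : List (Option Int)) : Nat → Int → Int
  | 0, i => i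
  | f+1, i =>
    match PySem.List.pyGet? seq i with
    | some none => aScanUp seq f (i+1)
    | _ => i

-- 'while sequence_ids[i] == None: i -= 1'
def aScanDown (seq : List (Option Int)) : Nat → Int → Int
  | 0, i => i
  | f+1, i =>
    match PySem.List.pyGet? seq i with
    | some none => aScanDown seq f (i-1)
    | _ => i

def all_spans_mask (input_ids : List Int) (sequence_ids : List (Option Int)) (max_span_length : Int) : Int × Int × List Int × List Int × List (List Int) :=
  let text_start_index := aScanUp sequence_ids (sequence_ids.length + 1) 0
  let text_end_index := aScanDown sequence_ids (sequence_ids.length + 1) ((input_ids.length : Int) - 1)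
  let masks := sequence_ids.foldl
    (fun (p : List Int × List Int) s =>
      (p.1 ++ [if s.isSome then (1 : Int) else 0], p.2 ++ [if s.isSome then (1 : Int) else 0]))
    ([], [])
  let start_mask := masks.1
  let end_mask := masks.2
  let span_mask := (PySem.List.enumerate start_mask).map (fun is =>
    (PySem.List.enumerate end_mask).map (fun je =>
      (if je.1 - is.1 ≥ 0 ∧ je.1 - is.1 < max_span_length then (1 : Int) else 0) * is.2 * je.2))
  (text_start_index, text_end_index, start_mask, end_mask, span_mask)

-- ===== PORT B =====
def all_spans_mask_alt (input_ids : List Int) (sequence_ids : List (Option Int)) (max_span_length : Int) : Int × Int × List Int × List Int × List (List Int) :=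
  let n := sequence_ids.length
  let start_mask := sequence_ids.map (fun s => if s.isSome then (1 : Int) else 0)
  let end_mask := start_mask
  -- start_mask.index(1): raises ValueError when 1 absent; none excluded by Pre_, default is junk there
  let text_start_index : Int := ((PySem.List.index? start_mask 1).getD 0 : Nat)
  let pref := PySem.List.slice start_mask none (some (input_ids.length : Int))
  let revPrefix := (PySem.List.slice? pref none none (-1)).getD []
  let text_end_index : Int := (input_ids.length : Int) - 1 - ((PySem.List.index? revPrefix 1).getD 0 : Nat)
  let span_mask := (List.range n).map (fun (i : Nat) =>
    if PySem.List.pyGetD start_mask (i : Int) 0 = 1 ∧ max_span_length > 0 then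
      let hi : Int := min ((i : Int) + max_span_length) (n : Int)
      List.replicate i (0 : Int) ++ PySem.List.slice end_mask (some (i : Int)) (some hi)
        ++ List.replicate (n - hi.toNat) (0 : Int)
    else List.replicate n (0 : Int))
  (text_start_index, text_end_index, start_mask, end_mask, span_mask)

-- ===== PRECONDITION & SPEC =====
-- Pre_ excludes exactly the inputs where a scan leaves the list: all-None sequence_ids, input_ids
-- longer than sequence_ids or empty (IndexError in A), and unequal-length inputs whose prefix of
-- length len(input_ids) is all None, where A's downward scan wraps to negative indices; on the
-- excluded inputs where A still returns, B raises ValueError.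
def Pre_all_spans_mask (input_ids : List Int) (sequence_ids : List (Option Int)) (max_span_length : Int) : Prop :=
  input_ids ≠ [] ∧ input_ids.length ≤ sequence_ids.length ∧
    ∃ s ∈ sequence_ids.take input_ids.length, s.isSome
instance (input_ids : List Int) (sequence_ids : List (Option Int)) (max_span_length : Int) : Decidable (Pre_all_spans_mask input_ids sequence_ids max_span_length) := by unfold Pre_all_spans_mask; infer_instance
def pvWitness_all_spans_mask : List Int × List (Option Int) × Int := ([7, 8], [none, some 0, some 1], 2)

def Spec_all_spans_mask (input_ids : List Int) (sequence_ids : List (Option Int)) (max_span_length : Int) (out : Int × Int × List Int × List Int × List (List Int)) : Prop := out = all_spans_mask_alt input_ids sequence_ids max_span_length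
instance (input_ids : List Int) (sequence_ids : List (Option Int)) (max_span_length : Int) (out : Int × Int × List Int × List Int × List (List Int)) : Decidable (Spec_all_spans_mask input_ids sequence_ids max_span_length out) := by unfold Spec_all_spans_mask; infer_instance

-- ===== CLAIM (what is proved, stated in full; the proofs are below) =====
def Claim_equal_all_spans_mask : Prop := ∀ (input_ids : List Int) (sequence_ids : List (Option Int)) (max_span_length : Int), Dom_all_spans_mask input_ids sequence_ids max_span_length → Pre_all_spans_mask input_ids sequence_ids max_span_length → Spec_all_spans_mask input_ids sequence_ids max_span_length (all_spans_mask input_ids sequence_ids max_span_length)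


-- ===== LEMMAS AND PROOFS =====

def pvMaskVal (s : Option Int) : Int := if s.isSome then 1 else 0

theorem pv_masks_foldl (l : List (Option Int)) (a b : List Int) :
    l.foldl (fun (p : List Int × List Int) s =>
        (p.1 ++ [if s.isSome then (1 : Int) else 0], p.2 ++ [if s.isSome then (1 : Int) else 0])) (a, b)
      = (a ++ l.map pvMaskVal, b ++ l.map pvMaskVal) := by
  induction l generalizing a b with
  | nil => simp
  | cons x xs ih => simp [ih, pvMaskVal]

theorem pv_enumerate_eq (xs : List Int) (s : Int) :
    PySem.List.enumerate xs s = (List.range xs.length).map (fun (k : Nat) => (s + (k : Int), xs.getD k 0)) := by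
  induction xs generalizing s with
  | nil => simp [PySem.List.enumerate_nil]
  | cons x xs ih =>
      rw [PySem.List.enumerate_cons, ih]
      rw [show (x :: xs).length = xs.length + 1 from rfl, List.range_succ_eq_map]
      simp only [List.map_cons, List.map_map]
      refine congrArg₂ _ (by simp) ?_
      refine List.map_congr_left (fun k hk => ?_)
      simp only [Function.comp, List.getD_cons_succ]
      have : s + 1 + (k : Int) = s + (k.succ : Int) := by push_cast; ring
      rw [this]

theorem pv_scanUp_spec (seq : List (Option Int)) :
    ∀ (fuel i : Nat), seq.length - i < fuel →
      (∃ j, i ≤ j ∧ ∃ (hj : j < seq.length), (seq[j]).isSome) →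
      aScanUp seq fuel (i : Int) = ((i + (seq.drop i).findIdx (·.isSome) : Nat) : Int) := by
  intro fuel
  induction fuel with
  | zero => intro i h; omega
  | succ f ih =>
      intro i hf hex
      have hi : i < seq.length := by
        obtain ⟨j, hij, hj, _⟩ := hex; omega
      have hget : PySem.List.pyGet? seq (i : Int) = some seq[i] := by
        simp [PySem.List.pyGet?_natCast, List.getElem?_eq_getElem hi]
      rw [aScanUp, hget]
      have hdrop : seq.drop i = seq[i] :: seq.drop (i + 1) := by
        exact (List.drop_eq_getElem_cons hi)
      by_cases hs : (seq[i]).isSome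
      · cases hv : seq[i] with
        | none => simp [hv] at hs
        | some v =>
            simp only [hv]
            rw [hdrop, List.findIdx_cons]
            simp [hv]
      · cases hv : seq[i] with
        | some v => simp [hv] at hs
        | none =>
            simp only [hv]
            have : ((i : Int) + 1) = ((i + 1 : Nat) : Int) := by push_cast; ring
            rw [this, ih (i + 1) (by omega)]
            · rw [hdrop, List.findIdx_cons]
              simp only [hv, Option.isSome_none, Bool.false_eq_true, if_false, cond_false]
              push_cast; ring
            · obtain ⟨j, hij, hj, hjs⟩ := hex
              refine ⟨j, ?_, hj, hjs⟩
              rcases Nat.eq_or_lt_of_le hij with h | h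
              · subst h; rw [hv] at hjs; simp at hjs
              · omega

theorem pv_scanDown_spec (seq : List (Option Int)) :
    ∀ (fuel i : Nat), i < seq.length → i < fuel →
      (∃ j, j ≤ i ∧ ∃ (hj : j < seq.length), (seq[j]).isSome) →
      aScanDown seq fuel (i : Int)
        = (i : Int) - (((seq.take (i + 1)).reverse.findIdx (·.isSome) : Nat) : Int) := by
  intro fuel
  induction fuel with
  | zero => intro i _ h; omega
  | succ f ih =>
      intro i hi hf hex
      have hget : PySem.List.pyGet? seq (i : Int) = some seq[i] := by
        simp [PySem.List.pyGet?_natCast, List.getElem?_eq_getElem hi]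
      rw [aScanDown, hget]
      have htake : (seq.take (i + 1)).reverse = seq[i] :: (seq.take i).reverse := by
        rw [List.take_succ, List.getElem?_eq_getElem hi]
        simp
      by_cases hs : (seq[i]).isSome
      · cases hv : seq[i] with
        | none => simp [hv] at hs
        | some v =>
            simp only [hv]
            rw [htake, List.findIdx_cons]
            simp [hv]
      · cases hv : seq[i] with
        | some v => simp [hv] at hs
        | none =>
            simp only [hv]
            have hipos : 1 ≤ i := by
              obtain ⟨j, hij, hj, hjs⟩ := hex
              rcases Nat.eq_or_lt_of_le hij with h | h
              · subst h; rw [hv] at hjs; simp at hjs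
              · omega
            have : ((i : Int) - 1) = ((i - 1 : Nat) : Int) := by omega
            rw [this, ih (i - 1) (by omega) (by omega)]
            · rw [htake, List.findIdx_cons]
              simp only [hv, Option.isSome_none, Bool.false_eq_true, if_false, cond_false]
              have h2 : i - 1 + 1 = i := by omega
              rw [h2]
              omega
            · obtain ⟨j, hij, hj, hjs⟩ := hex
              refine ⟨j, ?_, hj, hjs⟩
              rcases Nat.eq_or_lt_of_le hij with h | h
              · subst h; rw [hv] at hjs; simp at hjs
              · omega

theorem pv_index_map_mask (seq : List (Option Int)) (hex : ∃ s ∈ seq, s.isSome) :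
    PySem.List.index? (seq.map pvMaskVal) 1 = some (seq.findIdx (·.isSome)) := by
  induction seq with
  | nil => simp at hex
  | cons x xs ih =>
      by_cases hx : x.isSome
      · have : pvMaskVal x = 1 := by simp [pvMaskVal, hx]
        rw [List.map_cons, this, PySem.List.index?_cons_self, List.findIdx_cons]
        simp [hx]
      · have h0 : pvMaskVal x = 0 := by simp [pvMaskVal]; simpa using hx
        have hne : pvMaskVal x ≠ 1 := by rw [h0]; decide
        rw [List.map_cons, PySem.List.index?_cons_of_ne _ hne, List.findIdx_cons]
        have hex' : ∃ s ∈ xs, s.isSome := by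
          obtain ⟨s, hs, hss⟩ := hex
          rcases List.mem_cons.mp hs with h | h
          · subst h; exact absurd hss hx
          · exact ⟨s, h, hss⟩
        rw [ih hex']
        simp [hx]

theorem pv_rowB_eq (mask : List Int) (m : Int) (i : Nat) (hi : i < mask.length)
    (hm : ∀ j, j < mask.length → mask.getD j 0 = 0 ∨ mask.getD j 0 = 1) :
    (if PySem.List.pyGetD mask (i : Int) 0 = 1 ∧ m > 0 then
        List.replicate i (0 : Int)
          ++ PySem.List.slice mask (some (i : Int)) (some (min ((i : Int) + m) (mask.length : Int)))
          ++ List.replicate (mask.length - (min ((i : Int) + m) (mask.length : Int)).toNat) (0 : Int)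
      else List.replicate mask.length (0 : Int))
      = (List.range mask.length).map (fun (j : Nat) =>
          (if (j : Int) - (i : Int) ≥ 0 ∧ (j : Int) - (i : Int) < m then (1 : Int) else 0)
            * mask.getD i 0 * mask.getD j 0) := by
  rw [PySem.List.pyGetD_natCast]
  by_cases h1 : mask.getD i 0 = 1 ∧ m > 0
  · rcases h1 with ⟨hmi, hmpos⟩
    rw [if_pos ⟨hmi, hmpos⟩]
    set W : Nat := (min ((i : Int) + m) (mask.length : Int)).toNat with hW
    have hWcast : (W : Int) = min ((i : Int) + m) (mask.length : Int) := by
      rw [hW]; rw [Int.toNat_of_nonneg (by omega)]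
    have hWlo : i + 1 ≤ W := by omega
    have hWhi : W ≤ mask.length := by omega
    rw [PySem.List.slice_toNat mask (by omega) (by omega)]
    rw [Int.toNat_natCast, ← hWcast, Int.toNat_natCast]
    have hslen : ((mask.drop i).take (W - i)).length = W - i := by
      simp; omega
    apply List.ext_getElem
    · simp; omega
    · intro j hj hj'
      have hjn : j < mask.length := by simpa using hj'
      rw [List.getElem_map, List.getElem_range]
      rcases lt_or_ge j i with hcase | hcase
      · rw [List.getElem_append_left (by simp [hslen]; omega),
            List.getElem_append_left (by simp; omega), List.getElem_replicate]
        have : ¬ ((j : Int) - (i : Int) ≥ 0 ∧ (j : Int) - (i : Int) < m) := by omega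
        rw [if_neg this]
        ring
      · rcases lt_or_ge j W with hcase2 | hcase2
        · rw [List.getElem_append_left (by simp [hslen]; omega)]
          rw [List.getElem_append_right (by simp; omega)]
          simp only [List.length_replicate, List.getElem_take, List.getElem_drop]
          have hband : ((j : Int) - (i : Int) ≥ 0 ∧ (j : Int) - (i : Int) < m) := by omega
          rw [if_pos hband, hmi]
          have hidx : i + (j - i) = j := by omega
          rw [getElem_congr rfl hidx (by omega), List.getD_eq_getElem _ _ hjn]
          ring
        · rw [List.getElem_append_right (by simp [hslen]; omega), List.getElem_replicate]
          have : ¬ ((j : Int) - (i : Int) ≥ 0 ∧ (j : Int) - (i : Int) < m) := by omega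
          rw [if_neg this]
          ring
  · rw [if_neg h1]
    symm
    rw [List.eq_replicate_iff]
    refine ⟨by simp, ?_⟩
    intro x hx
    rw [List.mem_map] at hx
    obtain ⟨j, hj, hxv⟩ := hx
    rw [List.mem_range] at hj
    rcases hm i hi with h0 | h0
    · rw [h0] at hxv
      simp at hxv
      omega
    · have hm0 : ¬ m > 0 := fun h => h1 ⟨h0, h⟩
      have : ¬ ((j : Int) - (i : Int) ≥ 0 ∧ (j : Int) - (i : Int) < m) := by omega
      rw [if_neg this] at hxv
      simp at hxv
      omega

theorem pv_mask_entries (seq : List (Option Int)) :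
    ∀ j, j < (seq.map pvMaskVal).length → (seq.map pvMaskVal).getD j 0 = 0 ∨ (seq.map pvMaskVal).getD j 0 = 1 := by
  intro j hj
  rw [List.length_map] at hj
  rw [List.getD_eq_getElem _ _ (by simpa using hj), List.getElem_map]
  by_cases h : (seq[j]).isSome
  · right; simp [pvMaskVal, h]
  · left; simp [pvMaskVal, h]

-- ===== VERDICT (by name: the statement is the Claim_ definition above) =====
theorem all_spans_mask_spec : Claim_equal_all_spans_mask := by
  intro input_ids seq m _ hpre
  obtain ⟨hne, hle, hex⟩ := hpre
  have hni1 : 1 ≤ input_ids.length := List.length_pos_iff.mpr hne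
  obtain ⟨s0, hs0mem, hs0⟩ := hex
  obtain ⟨j0, hj0lt, hj0⟩ := List.getElem_of_mem hs0mem
  have hj0lt' : j0 < input_ids.length := by
    have := hj0lt; simp [List.length_take] at this; omega
  have hj0n : j0 < seq.length := by omega
  have hj0some : (seq[j0]).isSome = true := by
    rw [List.getElem_take] at hj0; rw [hj0]; exact hs0
  have hsmem : s0 ∈ seq := List.mem_of_mem_take hs0mem
  unfold Spec_all_spans_mask
  simp only [all_spans_mask, all_spans_mask_alt]
  rw [pv_masks_foldl seq [] []]
  simp only [List.nil_append]
  have hmaskB : (fun (s : Option Int) => if s.isSome then (1 : Int) else 0) = pvMaskVal := rfl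
  rw [hmaskB]
  simp only [Prod.mk.injEq]
  refine ⟨?_, ?_, trivial, trivial, ?_⟩
  · -- start index
    have hA := pv_scanUp_spec seq (seq.length + 1) 0 (by omega) ⟨j0, by omega, hj0n, hj0some⟩
    have hB := pv_index_map_mask seq ⟨s0, hsmem, hs0⟩
    rw [hB]
    simpa using hA
  · -- end index
    have hk : ((input_ids.length : Int) - 1) = ((input_ids.length - 1 : Nat) : Int) := by omega
    have hA := pv_scanDown_spec seq (seq.length + 1) (input_ids.length - 1) (by omega) (by omega)
      ⟨j0, by omega, hj0n, hj0some⟩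
    rw [hk, hA]
    rw [PySem.List.slice_to_natCast, PySem.List.slice?_none_none_neg_one]
    simp only [Option.getD_some]
    rw [← List.map_take, ← List.map_reverse]
    have hexr : ∃ s ∈ (seq.take input_ids.length).reverse, s.isSome := by
      exact ⟨s0, List.mem_reverse.mpr hs0mem, hs0⟩
    rw [pv_index_map_mask _ hexr]
    simp only [Option.getD_some]
    have h2 : input_ids.length - 1 + 1 = input_ids.length := by omega
    rw [h2]
  · -- span mask
    rw [pv_enumerate_eq]
    simp only [List.map_map, List.length_map]
    refine List.map_congr_left (fun i hi => ?_)
    rw [List.mem_range] at hi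
    have := pv_rowB_eq (seq.map pvMaskVal) m i (by simpa using hi) (pv_mask_entries seq)
    rw [List.length_map] at this
    rw [this]
    refine List.map_congr_left (fun j hj => ?_)
    simp [Function.comp]
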